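-- pv_equiv track=rewrite | github.com/NousResearch/atropos | environments/eval_environments/mmmu_pro_environment.py | extract_answer_cot
-- ===== SOURCE A (Python) =====
-- from string import ascii_uppercase
-- from typing import List, Optional, Tuple
--
-- def extract_answer_cot(response: str) -> Optional[str]:
--     """Extract answer from COT response format 'Answer: X'."""
--     lines = response.strip().split("\n")
--     lines = [x.strip() for x in lines]
--
--     for line in reversed(lines):
--         if line.startswith("Answer:"):
--             rest = line[7:].strip()
--             from collections import Counter
--
--             letter_counts = Counter(
--                 ch for ch in rest.upper() if ch in ascii_uppercase[:10]
--             )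
--             if len(letter_counts) == 1:
--                 return list(letter_counts.keys())[0]
--             elif letter_counts:
--                 for ch in rest.upper():
--                     if ch in ascii_uppercase[:10]:
--                         return ch
--     return None
-- ===== SOURCE B (Python) =====
-- def extract_answer_cot(response):
--     """Extract answer from COT response format 'Answer: X'."""
--     for line in reversed(response.strip().split("\n")):
--         line = line.strip()
--         if line.startswith("Answer:"):
--             for ch in line[7:].strip().upper():
--                 if ch in "ABCDEFGHIJ":
--                     return ch
--     return None
-- ===== Notes on version B (the rewrite author's own statement) =====
-- stated objective: simpler
-- what changed: B drops the Counter and the len==1/elif branching entirely: for each reversed answer-prefixed line it just returns the first A-J character of the rest (both of A's branches reduce to that first letter), falling through to earlier lines when none is found.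
import Mathlib
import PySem

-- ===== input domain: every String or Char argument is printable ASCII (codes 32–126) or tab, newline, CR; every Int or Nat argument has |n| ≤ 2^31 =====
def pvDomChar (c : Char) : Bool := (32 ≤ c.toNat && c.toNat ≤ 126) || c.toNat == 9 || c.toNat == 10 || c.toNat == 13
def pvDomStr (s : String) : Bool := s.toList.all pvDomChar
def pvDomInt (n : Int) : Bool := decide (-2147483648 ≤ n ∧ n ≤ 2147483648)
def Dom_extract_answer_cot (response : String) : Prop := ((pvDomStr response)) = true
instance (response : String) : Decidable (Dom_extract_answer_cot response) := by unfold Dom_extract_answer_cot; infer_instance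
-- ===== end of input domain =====

-- B drops A's Counter and len==1/elif branching: it returns the first A-J character after each
-- reversed answer-prefixed line directly (simpler; same behaviour, proved equivalent).


-- ===== PORT A =====
-- ascii_uppercase[:10]
def pvLetters : List Char := "ABCDEFGHIJ".toList

-- the 'for line in reversed(lines):' loop of A (lines already stripped)
def extract_answer_cot_loopA : List (List Char) → Option String
  | [] => none
  | line :: restL =>
      if PySem.Chars.startswith line "Answer:".toList then
        let rest := PySem.Chars.strip (PySem.Chars.slice line (some 7) none)
        let counts := PySem.Dict.counter ((PySem.Chars.upper rest).filter (fun ch => pvLetters.contains ch))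
        if counts.items.length == 1 then
          (PySem.List.pyGet? counts.keys 0).map (fun c => String.ofList [c])
        else if !counts.items.isEmpty then
          match (PySem.Chars.upper rest).find? (fun ch => pvLetters.contains ch) with
          | some ch => some (String.ofList [ch])
          | none => extract_answer_cot_loopA restL
        else extract_answer_cot_loopA restL
      else extract_answer_cot_loopA restL

def extract_answer_cot (response : String) : Option String :=
  let lines := PySem.Chars.splitOn (PySem.Chars.strip response.toList) ['\n']
  let lines := lines.map PySem.Chars.strip
  extract_answer_cot_loopA lines.reverse

-- ===== PORT B =====
-- B's loop: strip each line, on an 'Answer:' line return the first A-J letter of the rest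
def extract_answer_cot_loopB : List (List Char) → Option String
  | [] => none
  | raw :: restL =>
      let line := PySem.Chars.strip raw
      if PySem.Chars.startswith line "Answer:".toList then
        match (PySem.Chars.upper (PySem.Chars.strip (PySem.Chars.slice line (some 7) none))).find?
            (fun ch => ("ABCDEFGHIJ".toList).contains ch) with
        | some ch => some (String.ofList [ch])
        | none => extract_answer_cot_loopB restL
      else extract_answer_cot_loopB restL

def extract_answer_cot_alt (response : String) : Option String :=
  extract_answer_cot_loopB (PySem.Chars.splitOn (PySem.Chars.strip response.toList) ['\n']).reverse

-- ===== PRECONDITION & SPEC =====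
def Spec_extract_answer_cot (response : String) (out : Option String) : Prop := out = extract_answer_cot_alt response
instance (response : String) (out : Option String) : Decidable (Spec_extract_answer_cot response out) := by unfold Spec_extract_answer_cot; infer_instance

-- ===== CLAIM (what is proved, stated in full; the proofs are below) =====
def Claim_equal_extract_answer_cot : Prop := ∀ (response : String), Dom_extract_answer_cot response → Spec_extract_answer_cot response (extract_answer_cot response)

-- ===== LEMMAS AND PROOFS =====

lemma pv_foldl_add_head {α : Type} [BEq α] (xs : List α) : ∀ (s : PySem.Set α), s ≠ [] →
    (xs.foldl PySem.Set.add s).head? = s.head? := by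
  induction xs with
  | nil => intro s _; rfl
  | cons x t ih =>
      intro s h
      simp only [List.foldl_cons]
      have hadd : (PySem.Set.add s x).head? = s.head? ∧ PySem.Set.add s x ≠ [] := by
        unfold PySem.Set.add
        split_ifs with hc
        · exact ⟨rfl, h⟩
        · cases s with
          | nil => exact absurd rfl h
          | cons a b => simp
      rw [ih _ hadd.2, hadd.1]

lemma pv_ofList_head {α : Type} [BEq α] (xs : List α) :
    (PySem.Set.ofList xs).head? = xs.head? := by
  cases xs with
  | nil => rfl
  | cons c t =>
      show ((c :: t).foldl PySem.Set.add PySem.Set.empty).head? = some c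
      simp only [List.foldl_cons]
      have h1 : PySem.Set.add PySem.Set.empty c = [c] := by
        simp [PySem.Set.add, PySem.Set.empty]
      rw [h1, pv_foldl_add_head t [c] (by simp)]; rfl

-- A's answer-line branch collapses to "first A-J letter of the line, else fall through" (z = the fall-through)
lemma pv_branch (p : Char → Bool) (u : List Char) (z : Option String) :
    (if ((PySem.Dict.counter (u.filter p)).items.length == 1) = true then
        Option.map (fun c => String.ofList [c]) (PySem.List.pyGet? (PySem.Dict.counter (u.filter p)).keys 0)
      else if (!(PySem.Dict.counter (u.filter p)).items.isEmpty) = true then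
        match u.find? p with
        | some ch => some (String.ofList [ch])
        | none => z
      else z)
    = match u.find? p with
      | some ch => some (String.ofList [ch])
      | none => z := by
  have hklen : (PySem.Dict.counter (u.filter p)).items.length
      = (PySem.Dict.counter (u.filter p)).keys.length := by
    simp [PySem.Dict.keys]
  have hhead : (PySem.Dict.counter (u.filter p)).keys.head? = (u.filter p).head? := by
    rw [PySem.Dict.keys_counter, pv_ofList_head]
  have hfind : u.find? p = (u.filter p).head? := List.head?_filter.symm
  rw [hfind]
  cases hft : u.filter p with
  | nil =>
      rw [hft] at hhead hklen
      have hi0 : (PySem.Dict.counter ([] : List Char)).items = [] := rfl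
      simp [hi0]
  | cons c t =>
      rw [hft] at hhead hklen
      by_cases h1 : (PySem.Dict.counter (c :: t)).items.length = 1
      · have hk1 : (PySem.Dict.counter (c :: t)).keys.length = 1 := by omega
        obtain ⟨a, hka⟩ := List.length_eq_one_iff.mp hk1
        rw [hka] at hhead
        have hac : a = c := by simpa using hhead
        subst hac
        simp [h1, hka, PySem.List.pyGet?, PySem.List.pyIdx?]
      · have hine : (PySem.Dict.counter (c :: t)).items ≠ [] := by
          intro h0
          have hle : (PySem.Dict.counter (c :: t)).keys.length = 0 := by
            rw [h0] at hklen; simpa using hklen.symm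
          rw [List.length_eq_zero_iff.mp hle] at hhead
          simp at hhead
        simp [h1, hine]

-- per-list equality of the two loops
lemma pv_loop_eq (ls : List (List Char)) :
    extract_answer_cot_loopA (ls.map PySem.Chars.strip) = extract_answer_cot_loopB ls := by
  induction ls with
  | nil => rfl
  | cons raw restL ih =>
      simp only [List.map_cons]
      unfold extract_answer_cot_loopA extract_answer_cot_loopB
      by_cases hsw : PySem.Chars.startswith (PySem.Chars.strip raw) "Answer:".toList = true
      · simp only [hsw, if_true]
        rw [ih]
        exact pv_branch (fun ch => pvLetters.contains ch)
          (PySem.Chars.upper (PySem.Chars.strip (PySem.Chars.slice (PySem.Chars.strip raw) (some 7) none)))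
          (extract_answer_cot_loopB restL)
      · simp only [hsw]
        exact ih

-- ===== VERDICT (by name: the statement is the Claim_ definition above) =====
theorem extract_answer_cot_spec : Claim_equal_extract_answer_cot := by
  intro response _
  show extract_answer_cot response = extract_answer_cot_alt response
  unfold extract_answer_cot extract_answer_cot_alt
  simp only [← List.map_reverse]
  exact pv_loop_eq _
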